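-- pv_equiv track=rewrite | github.com/java-cheatsheet/codechallenge | src/main/java/google/Level5/solution.py | gcdTable
-- ===== SOURCE A (Python) =====
-- def gcdTable(n):
--     x=[0 for x in range(n)]
--     result = [[0 for x in range(n)] for y in range(n)]
--
--     for i in range(n):
--         for j in range(i,n):
--             if i == 0 or j == 0:
--                 result[i][j] = 1
--                 result[j][i] = 1
--             elif i == j:
--                 result[i][j] = i+1
--             else:
--                 result[i][j] = result[i][j-i-1]
--                 result[j][i] = result[i][j-i-1]
--     return result
-- ===== SOURCE B (Python) =====
-- def gcdTable(n):
--     def gcd(a, b):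
--         while b:
--             a, b = b, a % b
--         return a
--     return [[gcd(i + 1, j + 1) for j in range(n)] for i in range(n)]
-- ===== Notes on version B (the rewrite author's own statement) =====
-- stated objective: simpler
-- what changed: A fills the table by a self-referential subtractive recurrence with symmetric in-place updates (result[i][j] = result[i][j-i-1] plus i==0/i==j base cases); B computes each cell independently as gcd(i+1, j+1) by the Euclidean algorithm in a plain double comprehension.
import Mathlib
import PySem

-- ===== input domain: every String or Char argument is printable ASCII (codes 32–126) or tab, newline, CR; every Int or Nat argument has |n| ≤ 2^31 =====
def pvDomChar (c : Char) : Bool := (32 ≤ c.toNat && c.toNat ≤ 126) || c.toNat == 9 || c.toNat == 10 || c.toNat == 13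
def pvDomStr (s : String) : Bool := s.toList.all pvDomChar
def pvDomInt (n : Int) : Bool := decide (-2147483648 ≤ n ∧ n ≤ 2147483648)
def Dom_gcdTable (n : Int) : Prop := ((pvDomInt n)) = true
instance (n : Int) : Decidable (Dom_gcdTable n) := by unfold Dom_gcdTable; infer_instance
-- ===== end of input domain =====

-- B replaces A's self-referential subtractive recurrence (with symmetric in-place
-- updates) by an independent Euclidean gcd per cell in a plain double comprehension;
-- objective: simpler.

-- ===== PORT A =====
-- result[i][j]  (Python reads of a possibly out-of-range index never occur here;
-- pyGetD/pySetD are exact on the in-range indices A uses)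
def pvGet2 (m : List (List Int)) (i j : Int) : Int :=
  PySem.List.pyGetD (PySem.List.pyGetD m i []) j 0

-- result[i][j] = v  (row fetched, cell set, row written back: the in-place update)
def pvSet2 (m : List (List Int)) (i j : Int) (v : Int) : List (List Int) :=
  PySem.List.pySetD m i (PySem.List.pySetD (PySem.List.pyGetD m i []) j v)

-- the body of A's inner loop, branch for branch
def pvStepA (i j : Int) (m : List (List Int)) : List (List Int) :=
  if i == 0 || j == 0 then
    pvSet2 (pvSet2 m i j 1) j i 1
  else if i == j then
    pvSet2 m i j (i + 1)
  else
    let m1 := pvSet2 m i j (pvGet2 m i (j - i - 1))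
    pvSet2 m1 j i (pvGet2 m1 i (j - i - 1))

def gcdTable (n : Int) : List (List Int) :=
  let _x := (PySem.List.pyRange 0 n 1).map (fun _ => (0 : Int))   -- A's dead 'x' list
  let result := (PySem.List.pyRange 0 n 1).map
    (fun _ => (PySem.List.pyRange 0 n 1).map (fun _ => (0 : Int)))
  (PySem.List.pyRange 0 n 1).foldl
    (fun m i => (PySem.List.pyRange i n 1).foldl (fun m j => pvStepA i j m) m)
    result

-- ===== PORT B =====
-- Source B's inner helper: while b: a, b = b, a % b; return a
def pvGcd (a b : Int) : Int :=
  if b ≠ 0 then pvGcd b (PySem.Int.mod a b) else a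
termination_by b.natAbs
decreasing_by
  rcases lt_or_gt_of_ne (by assumption : b ≠ 0) with hb | hb
  · have h1 := PySem.Int.mod_neg_bounds a hb
    omega
  · have h1 := PySem.Int.mod_nonneg a hb
    have h2 := PySem.Int.mod_lt a hb
    omega

def gcdTable_alt (n : Int) : List (List Int) :=
  (PySem.List.pyRange 0 n 1).map
    (fun i => (PySem.List.pyRange 0 n 1).map (fun j => pvGcd (i + 1) (j + 1)))

-- ===== PRECONDITION & SPEC =====
def Spec_gcdTable (n : Int) (out : List (List Int)) : Prop := out = gcdTable_alt n
instance (n : Int) (out : List (List Int)) : Decidable (Spec_gcdTable n out) := by unfold Spec_gcdTable; infer_instance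

-- ===== CLAIM (what is proved, stated in full; the proofs are below) =====
def Claim_equal_gcdTable : Prop := ∀ (n : Int), Dom_gcdTable n → Spec_gcdTable n (gcdTable n)

-- ===== LEMMAS AND PROOFS =====

-- the common value both programs compute: the n×n table of gcd(i+1, j+1)
def pvG (N : Nat) : List (List Int) :=
  (List.range N).map (fun a => (List.range N).map (fun b => ((Nat.gcd (a + 1) (b + 1) : Nat) : Int)))

-- pvGcd is Euclid's algorithm: on Nat casts it is Nat.gcd
theorem pvGcd_eq_gcd : ∀ (b a : Nat), pvGcd (a : Int) (b : Int) = ((Nat.gcd a b : Nat) : Int) := by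
  intro b
  induction b using Nat.strong_induction_on with
  | _ b ih =>
    intro a
    rw [pvGcd]
    by_cases hb : b = 0
    · simp [hb]
    · have hb' : ((b : Int)) ≠ 0 := by exact_mod_cast hb
      rw [if_pos hb', PySem.Int.mod_natCast, ih (a % b) (Nat.mod_lt _ (Nat.pos_of_ne_zero hb))]
      rw [Nat.gcd_comm b (a % b), ← Nat.gcd_rec, Nat.gcd_comm]

theorem alt_eq_pvG (n : Int) (hn : 0 ≤ n) : gcdTable_alt n = pvG n.toNat := by
  obtain ⟨N, rfl⟩ : ∃ N : Nat, n = (N : Int) := ⟨n.toNat, by omega⟩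
  unfold gcdTable_alt pvG
  rw [PySem.List.pyRange_one]
  simp only [sub_zero, Int.toNat_natCast, List.map_map, Int.toNat_natCast]
  apply List.map_congr_left
  intro a _
  apply List.map_congr_left
  intro b _
  simp only [Function.comp]
  have : ((0 : Int) + a) + 1 = ((a + 1 : Nat) : Int) := by push_cast; ring
  have h2 : ((0 : Int) + b) + 1 = ((b + 1 : Nat) : Int) := by push_cast; ring
  rw [this, h2, pvGcd_eq_gcd]

-- ---- the invariant machinery for A's fold ----

def pvDims (N : Nat) (m : List (List Int)) : Prop :=
  m.length = N ∧ ∀ a : Nat, a < N → (m.getD a []).length = N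

-- cells already written when A is about to process column j of row i
def pvCov (i j a b : Nat) : Prop :=
  min a b < i ∨ (min a b = i ∧ max a b < j)

def pvInv (N i j : Nat) (m : List (List Int)) : Prop :=
  pvDims N m ∧
  ∀ a b : Nat, a < N → b < N → pvCov i j a b →
    pvGet2 m (a : Int) (b : Int) = ((Nat.gcd (a + 1) (b + 1) : Nat) : Int)

theorem get2_natCast (m : List (List Int)) (a b : Nat) :
    pvGet2 m (a : Int) (b : Int) = (m.getD a []).getD b 0 := by
  simp [pvGet2, PySem.List.pyGetD_natCast]

theorem set2_natCast (m : List (List Int)) (i j : Nat) (v : Int) :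
    pvSet2 m (i : Int) (j : Int) v = m.set i ((m.getD i []).set j v) := by
  simp [pvSet2, PySem.List.pySetD_natCast, PySem.List.pyGetD_natCast]

theorem getD_set (l : List (List Int)) (i a : Nat) (r : List Int) (hi : i < l.length) :
    (l.set i r).getD a [] = if a = i then r else l.getD a [] := by
  rcases eq_or_ne a i with rfl | h
  · simp [List.getD, List.getElem?_set, hi]
  · have h2 : ¬ i = a := Ne.symm h
    simp [List.getD, List.getElem?_set, h, h2]

theorem getD_set_int (l : List Int) (i a : Nat) (v : Int) (hi : i < l.length) :
    (l.set i v).getD a 0 = if a = i then v else l.getD a 0 := by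
  rcases eq_or_ne a i with rfl | h
  · simp [List.getD, List.getElem?_set, hi]
  · have h2 : ¬ i = a := Ne.symm h
    simp [List.getD, List.getElem?_set, h, h2]

theorem dims_set2 {N : Nat} {m : List (List Int)} (hD : pvDims N m) {i j : Nat}
    (hi : i < N) (hj : j < N) (v : Int) : pvDims N (pvSet2 m (i : Int) (j : Int) v) := by
  obtain ⟨hl, hr⟩ := hD
  rw [set2_natCast]
  refine ⟨by simp [hl], ?_⟩
  intro a ha
  rw [getD_set _ _ _ _ (by omega)]
  split
  · rw [List.length_set]; exact hr i hi
  · exact hr a ha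

theorem get2_set2 {N : Nat} {m : List (List Int)} (hD : pvDims N m) {i j : Nat}
    (hi : i < N) (hj : j < N) (v : Int) (a b : Nat) :
    pvGet2 (pvSet2 m (i : Int) (j : Int) v) (a : Int) (b : Int) =
      if a = i ∧ b = j then v else pvGet2 m (a : Int) (b : Int) := by
  obtain ⟨hl, hr⟩ := hD
  rw [set2_natCast, get2_natCast, get2_natCast, getD_set _ _ _ _ (by omega)]
  rcases eq_or_ne a i with rfl | hai
  · rw [if_pos rfl, getD_set_int _ _ _ _ (by rw [hr a hi]; omega)]
    rcases eq_or_ne b j with rfl | hbj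
    · simp
    · simp [hbj]
  · simp [hai]

-- one execution of the loop body extends the set of correct cells from (i,j) to (i,j+1)
theorem step_inv {N i j : Nat} (hij : i ≤ j) (hj : j < N) {m : List (List Int)}
    (h : pvInv N i j m) : pvInv N i (j + 1) (pvStepA (i : Int) (j : Int) m) := by
  obtain ⟨hD, hV⟩ := h
  have hi : i < N := by omega
  by_cases hi0 : i = 0
  · -- first branch: result[0][j] = result[j][0] = 1
    subst hi0
    have hbr : pvStepA (((0:Nat)) : Int) (j : Int) m =
        pvSet2 (pvSet2 m (((0:Nat)) : Int) (j : Int) 1) (j : Int) (((0:Nat)) : Int) 1 := by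
      simp [pvStepA]
    rw [hbr]
    have hset1 := dims_set2 hD (by omega : (0:Nat) < N) hj (1 : Int)
    refine ⟨dims_set2 hset1 hj (by omega : (0:Nat) < N) (1 : Int), ?_⟩
    intro a b ha hb hcov
    rw [get2_set2 hset1 hj (by omega) 1 a b, get2_set2 hD (by omega) hj 1 a b]
    rcases hcov with hlt | ⟨hmin, hmax⟩
    · omega
    · -- min a b = 0, max a b ≤ j
      rcases eq_or_ne (a, b) (j, 0) with hp | hp
      · obtain ⟨ha1, hb1⟩ : a = j ∧ b = 0 := by simpa [Prod.ext_iff] using hp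
        rw [if_pos ⟨ha1, hb1⟩, ha1, hb1]
        simp [Nat.gcd_one_right]
      · rcases eq_or_ne (a, b) (0, j) with hq | hq
        · obtain ⟨ha1, hb1⟩ : a = 0 ∧ b = j := by simpa [Prod.ext_iff] using hq
          rcases eq_or_ne j 0 with hj0 | hj0
          · rw [if_pos (by omega : a = j ∧ b = 0), ha1, hb1, hj0]
            simp
          · rw [if_neg (by omega : ¬ (a = j ∧ b = 0)), if_pos ⟨ha1, hb1⟩, ha1, hb1]
            simp [Nat.gcd_one_left]
        · have ha' : ¬ (a = j ∧ b = 0) := by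
            intro ⟨x, y⟩; exact hp (by simp [x, y])
          have hb' : ¬ (a = 0 ∧ b = j) := by
            intro ⟨x, y⟩; exact hq (by simp [x, y])
          rw [if_neg ha', if_neg hb']
          exact hV a b ha hb (Or.inr ⟨hmin, by omega⟩)
  · by_cases hijeq : i = j
    · -- diagonal: result[i][i] = i + 1
      subst hijeq
      have hbr : pvStepA (i : Int) (i : Int) m = pvSet2 m (i : Int) (i : Int) ((i : Int) + 1) := by
        simp [pvStepA, hi0]
      rw [hbr]
      refine ⟨dims_set2 hD hi hi _, ?_⟩
      intro a b ha hb hcov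
      rw [get2_set2 hD hi hi _ a b]
      rcases eq_or_ne (a, b) (i, i) with hp | hp
      · obtain ⟨ha1, hb1⟩ : a = i ∧ b = i := by simpa [Prod.ext_iff] using hp
        rw [if_pos ⟨ha1, hb1⟩, ha1, hb1, Nat.gcd_self]
        push_cast
        ring
      · have hne : ¬ (a = i ∧ b = i) := by
          intro ⟨x, y⟩; exact hp (by simp [x, y])
        rw [if_neg hne]
        refine hV a b ha hb ?_
        rcases hcov with hlt | ⟨hmin, hmax⟩
        · exact Or.inl hlt
        · exact Or.inr ⟨hmin, by omega⟩
    · -- below the diagonal: subtractive step reading result[i][j-i-1]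
      have hij' : i < j := by omega
      set k : Nat := j - i - 1 with hk
      have hkN : k < N := by omega
      have ekey : (j : Int) - (i : Int) - 1 = (k : Int) := by push_cast; omega
      have hvv : pvGet2 m (i : Int) (k : Int) = ((Nat.gcd (i + 1) (j + 1) : Nat) : Int) := by
        have hcovk : pvCov i j i k := by
          rcases Nat.lt_or_ge k i with hki | hki
          · exact Or.inl (by omega)
          · exact Or.inr ⟨by omega, by omega⟩
        rw [hV i k hi hkN hcovk]
        congr 1
        have : j + 1 = (k + 1) + (i + 1) := by omega
        rw [this, Nat.gcd_add_self_right]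
      have hbr : pvStepA (i : Int) (j : Int) m =
          pvSet2 (pvSet2 m (i : Int) (j : Int) (pvGet2 m (i : Int) (k : Int)))
            (j : Int) (i : Int)
            (pvGet2 (pvSet2 m (i : Int) (j : Int) (pvGet2 m (i : Int) (k : Int))) (i : Int) (k : Int)) := by
        have hj0 : ¬ j = 0 := by omega
        simp only [pvStepA, ekey]
        simp [hi0, hj0, hijeq]
      rw [hbr]
      have hset1 := dims_set2 hD hi hj (pvGet2 m (i : Int) (k : Int))
      have hread2 : pvGet2 (pvSet2 m (i : Int) (j : Int) (pvGet2 m (i : Int) (k : Int))) (i : Int) (k : Int)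
          = ((Nat.gcd (i + 1) (j + 1) : Nat) : Int) := by
        rw [get2_set2 hD hi hj _ i k, if_neg (by omega), hvv]
      refine ⟨dims_set2 hset1 hj hi _, ?_⟩
      intro a b ha hb hcov
      rw [get2_set2 hset1 hj hi _ a b, get2_set2 hD hi hj _ a b, hread2, hvv]
      rcases eq_or_ne (a, b) (j, i) with hp | hp
      · obtain ⟨ha1, hb1⟩ : a = j ∧ b = i := by simpa [Prod.ext_iff] using hp
        rw [if_pos ⟨ha1, hb1⟩, ha1, hb1, Nat.gcd_comm]
      · have hne1 : ¬ (a = j ∧ b = i) := by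
          intro ⟨x, y⟩; exact hp (by simp [x, y])
        rw [if_neg hne1]
        rcases eq_or_ne (a, b) (i, j) with hq | hq
        · obtain ⟨ha1, hb1⟩ : a = i ∧ b = j := by simpa [Prod.ext_iff] using hq
          rw [if_pos ⟨ha1, hb1⟩, ha1, hb1]
        · have hne2 : ¬ (a = i ∧ b = j) := by
            intro ⟨x, y⟩; exact hq (by simp [x, y])
          rw [if_neg hne2]
          refine hV a b ha hb ?_
          rcases hcov with hlt | ⟨hmin, hmax⟩
          · exact Or.inl hlt
          · -- max a b < j + 1 and (a,b) ≠ (i,j),(j,i): in fact max < j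
            right
            refine ⟨hmin, ?_⟩
            rcases Nat.lt_or_ge (max a b) j with h | h
            · exact h
            · exfalso
              have hmj : max a b = j := by omega
              rcases Nat.le_total a b with hab | hab
              · have : a = i ∧ b = j := by omega
                exact hne2 this
              · have : a = j ∧ b = i := by omega
                exact hne1 this

-- running the rest of row i preserves the invariant up to column N
theorem row_inv (N i : Nat) : ∀ (d j : Nat) (m : List (List Int)), N - j ≤ d → i ≤ j →
    pvInv N i j m →
    pvInv N i N ((PySem.List.pyRange (j : Int) (N : Int) 1).foldl (fun m j => pvStepA (i : Int) j m) m) := by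
  intro d
  induction d with
  | zero =>
    intro j m hd hij h
    rw [PySem.List.pyRange_one_eq_nil (by exact_mod_cast Nat.le_of_sub_eq_zero (by omega))]
    obtain ⟨hD, hV⟩ := h
    exact ⟨hD, fun a b ha hb hcov => hV a b ha hb (by
      rcases hcov with hlt | ⟨hmin, hmax⟩
      · exact Or.inl hlt
      · exact Or.inr ⟨hmin, by omega⟩)⟩
  | succ d ih =>
    intro j m hd hij h
    rcases Nat.lt_or_ge j N with hjN | hjN
    · rw [PySem.List.pyRange_one_cons (by exact_mod_cast hjN)]
      rw [List.foldl_cons]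
      have e1 : ((j : Int)) + 1 = ((j + 1 : Nat) : Int) := by push_cast; ring
      rw [e1]
      exact ih (j + 1) _ (by omega) (by omega) (step_inv hij hjN h)
    · rw [PySem.List.pyRange_one_eq_nil (by exact_mod_cast hjN)]
      obtain ⟨hD, hV⟩ := h
      exact ⟨hD, fun a b ha hb hcov => hV a b ha hb (by
        rcases hcov with hlt | ⟨hmin, hmax⟩
        · exact Or.inl hlt
        · exact Or.inr ⟨hmin, by omega⟩)⟩

-- running rows i, i+1, … fills the whole table
theorem outer_inv (N : Nat) : ∀ (d i : Nat) (m : List (List Int)), N - i ≤ d →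
    pvInv N i i m →
    pvInv N N N ((PySem.List.pyRange (i : Int) (N : Int) 1).foldl
      (fun m i => (PySem.List.pyRange i (N : Int) 1).foldl (fun m j => pvStepA i j m) m) m) := by
  intro d
  induction d with
  | zero =>
    intro i m hd h
    have hiN : N ≤ i := by omega
    rw [PySem.List.pyRange_one_eq_nil (by exact_mod_cast hiN)]
    obtain ⟨hD, hV⟩ := h
    exact ⟨hD, fun a b ha hb _ => hV a b ha hb (Or.inl (by omega))⟩
  | succ d ih =>
    intro i m hd h
    rcases Nat.lt_or_ge i N with hiN | hiN
    · rw [PySem.List.pyRange_one_cons (by exact_mod_cast hiN)]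
      rw [List.foldl_cons]
      have hrow := row_inv N i (N - i) i m (by omega) (le_refl i) h
      have hnext : pvInv N (i + 1) (i + 1)
          ((PySem.List.pyRange (i : Int) (N : Int) 1).foldl (fun m j => pvStepA (i : Int) j m) m) := by
        obtain ⟨hD, hV⟩ := hrow
        exact ⟨hD, fun a b ha hb hcov => hV a b ha hb (by
          rcases hcov with hlt | ⟨hmin, hmax⟩
          · rcases Nat.lt_or_ge (min a b) i with h' | h'
            · exact Or.inl h'
            · exact Or.inr ⟨by omega, by omega⟩
          · omega)⟩
      have e1 : ((i : Int)) + 1 = ((i + 1 : Nat) : Int) := by push_cast; ring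
      rw [e1]
      exact ih (i + 1) _ (by omega) hnext
    · rw [PySem.List.pyRange_one_eq_nil (by exact_mod_cast hiN)]
      obtain ⟨hD, hV⟩ := h
      exact ⟨hD, fun a b ha hb _ => hV a b ha hb (Or.inl (by omega))⟩

theorem inv_eq_pvG {N : Nat} {m : List (List Int)} (h : pvInv N N N m) : m = pvG N := by
  obtain ⟨⟨hl, hr⟩, hV⟩ := h
  apply List.ext_getElem
  · simp [pvG, hl]
  · intro a h1 h2
    have haN : a < N := by omega
    have hrowlen : (m.getD a []).length = N := hr a haN
    have hgetD : m.getD a [] = m[a] := by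
      simp [List.getD, List.getElem?_eq_getElem h1]
    apply List.ext_getElem
    · rw [← hgetD, hrowlen]
      simp [pvG, haN]
    · intro b hb1 hb2
      have hbN : b < N := by rw [← hgetD, hrowlen] at hb1; omega
      have := hV a b haN hbN (Or.inl (by omega))
      rw [get2_natCast, hgetD] at this
      have hget : m[a].getD b 0 = m[a][b] := by
        simp [List.getD, List.getElem?_eq_getElem hb1]
      rw [hget] at this
      rw [this]
      simp [pvG, haN, hbN]

theorem init_inv (N : Nat) :
    pvInv N 0 0 ((PySem.List.pyRange 0 (N : Int) 1).map
      (fun _ => (PySem.List.pyRange 0 (N : Int) 1).map (fun _ => (0 : Int)))) := by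
  refine ⟨⟨by simp [PySem.List.length_pyRange_one], ?_⟩, ?_⟩
  · intro a ha
    have hlen : ((PySem.List.pyRange 0 (N : Int) 1).map
        (fun _ => (PySem.List.pyRange 0 (N : Int) 1).map (fun _ => (0 : Int)))).length = N := by
      simp [PySem.List.length_pyRange_one]
    rw [List.getD, List.getElem?_eq_getElem (by omega)]
    simp [PySem.List.length_pyRange_one]
  · intro a b _ _ hcov
    rcases hcov with h | h <;> omega

theorem a_eq_pvG (n : Int) : gcdTable n = pvG n.toNat := by
  rcases Int.lt_or_le n 0 with hn | hn
  · have hnil : PySem.List.pyRange 0 n 1 = [] := PySem.List.pyRange_one_eq_nil (by omega)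
    have : n.toNat = 0 := by omega
    simp [gcdTable, hnil, this, pvG]
  · obtain ⟨N, rfl⟩ : ∃ N : Nat, n = (N : Int) := ⟨n.toNat, by omega⟩
    unfold gcdTable
    simp only [Int.toNat_natCast]
    have e0 : (0 : Int) = ((0 : Nat) : Int) := by norm_num
    have hfold := outer_inv N N 0
      ((PySem.List.pyRange 0 (N : Int) 1).map
        (fun _ => (PySem.List.pyRange 0 (N : Int) 1).map (fun _ => (0 : Int))))
      (by omega) (init_inv N)
    rw [e0] at hfold ⊢
    exact inv_eq_pvG hfold

-- ===== VERDICT (by name: the statement is the Claim_ definition above) =====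
theorem gcdTable_spec : Claim_equal_gcdTable := by
  intro n _
  unfold Spec_gcdTable
  rcases Int.lt_or_le n 0 with hn | hn
  · have hnil : PySem.List.pyRange 0 n 1 = [] := PySem.List.pyRange_one_eq_nil (by omega)
    rw [a_eq_pvG]
    have : n.toNat = 0 := by omega
    simp [gcdTable_alt, hnil, this, pvG]
  · rw [a_eq_pvG, alt_eq_pvG n hn]
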